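-- pv_equiv track=rewrite | github.com/znimator/University-Course2 | alg/lab1/lab1_2.py | replace_max_with_zero
-- ===== SOURCE A (Python) =====
-- def replace_max_with_zero(arr):
--     if not arr:
--         return arr
--
--     max_val = arr[0]
--     max_index = 0
--
--     for i in range(1, len(arr)):
--         if arr[i] > max_val:
--             max_val = arr[i]
--             max_index = i
--
--     arr[max_index] = 0
--     return arr
-- ===== SOURCE B (Python) =====
-- def replace_max_with_zero(arr):
--     n = len(arr)
--     if n == 0:
--         return arr
--     # backward sweep: suff[i] = max(arr[i:])
--     suff = arr[:]
--     for i in range(n - 2, -1, -1):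
--         if suff[i + 1] > suff[i]:
--             suff[i] = suff[i + 1]
--     # first position equal to its suffix maximum is the first global maximum
--     i = 0
--     while arr[i] != suff[i]:
--         i += 1
--     arr[i] = 0
--     return arr
-- ===== Notes on version B (the rewrite author's own statement) =====
-- stated objective: alternative
-- what changed: Replaces the forward loop that tracks the running maximum and its index with a backward suffix-maximum sweep followed by a forward scan for the first position whose element equals its suffix maximum (that position is the first occurrence of the global maximum).
import Mathlib
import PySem

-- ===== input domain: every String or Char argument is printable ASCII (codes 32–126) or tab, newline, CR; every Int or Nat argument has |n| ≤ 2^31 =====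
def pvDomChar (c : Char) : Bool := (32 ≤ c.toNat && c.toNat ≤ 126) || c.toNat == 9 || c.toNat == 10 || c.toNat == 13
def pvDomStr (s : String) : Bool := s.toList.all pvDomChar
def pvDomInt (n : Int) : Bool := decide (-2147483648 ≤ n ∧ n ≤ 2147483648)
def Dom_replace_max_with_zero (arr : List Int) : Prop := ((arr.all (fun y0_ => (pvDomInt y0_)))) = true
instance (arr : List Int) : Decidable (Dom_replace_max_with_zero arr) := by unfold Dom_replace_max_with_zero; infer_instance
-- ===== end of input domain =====

-- B replaces A's forward max-and-index-tracking loop with a backward suffix-maximum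
-- sweep plus a forward scan for the first element equal to its suffix maximum;
-- objective: alternative. Both Pythons mutate arr in place identically; the
-- equivalence proved here is about the return value.

-- ===== PORT A =====
def replace_max_with_zero (arr : List Int) : List Int :=
  if arr = [] then arr
  else
    let s := (PySem.List.pyRange 1 (PySem.List.len arr) 1).foldl
      (fun s i => if PySem.List.pyGetD arr i 0 > s.1 then (PySem.List.pyGetD arr i 0, i) else s)
      (PySem.List.pyGetD arr 0 0, (0 : Int))
    PySem.List.pySetD arr s.2 0

-- ===== PORT B =====
-- the backward fill loop 'suff[i] = max of suff[i], suff[i+1]' as structural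
-- recursion from the right (same values, same right-to-left order)
def suffMaxB : List Int → List Int
  | [] => []
  | [x] => [x]
  | x :: y :: t =>
      let s := suffMaxB (y :: t)
      (if s.headD 0 > x then s.headD 0 else x) :: s

-- the forward while loop 'while arr[i] != suff[i]: i += 1'
def findEqIdxB : List Int → List Int → Nat
  | x :: t, s0 :: st => if x ≠ s0 then findEqIdxB t st + 1 else 0
  | _, _ => 0

def replace_max_with_zero_alt (arr : List Int) : List Int :=
  if arr.length = 0 then arr
  else
    let suff := suffMaxB arr
    let i := findEqIdxB arr suff
    PySem.List.pySetD arr (i : Int) 0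

-- ===== PRECONDITION & SPEC =====
def Spec_replace_max_with_zero (arr : List Int) (out : List Int) : Prop := out = replace_max_with_zero_alt arr
instance (arr : List Int) (out : List Int) : Decidable (Spec_replace_max_with_zero arr out) := by unfold Spec_replace_max_with_zero; infer_instance

-- ===== CLAIM (what is proved, stated in full; the proofs are below) =====
def Claim_equal_replace_max_with_zero : Prop := ∀ (arr : List Int), Dom_replace_max_with_zero arr → Spec_replace_max_with_zero arr (replace_max_with_zero arr)

-- ===== LEMMAS AND PROOFS =====

-- A's loop over range(1, len) computes (max of arr, first index of the max), as Int.
lemma loopA_char (x : Int) (t : List Int) :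
    ((PySem.List.pyRange 1 (PySem.List.len (x :: t)) 1).foldl
      (fun s i => if PySem.List.pyGetD (x :: t) i 0 > s.1 then (PySem.List.pyGetD (x :: t) i 0, i) else s)
      (PySem.List.pyGetD (x :: t) 0 0, (0 : Int)))
    = (t.foldl max x, (((PySem.List.index? (x :: t) (t.foldl max x)).getD 0 : Nat) : Int)) := by
  induction t using List.reverseRecOn with
  | nil =>
      simp [PySem.List.len, PySem.List.pyRange_one_eq_nil (by norm_num : (1:Int) ≤ 1),
        PySem.List.pyGetD_zero_cons]
  | append_singleton t' y ih =>
      have hlen : PySem.List.len (x :: (t' ++ [y])) = PySem.List.len (x :: t') + 1 := by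
        simp [PySem.List.len]
      have hle : (1 : Int) ≤ PySem.List.len (x :: t') := by
        simp [PySem.List.len]
      rw [hlen, PySem.List.pyRange_one_succ_right hle, List.foldl_append]
      have hcongr :
          ((PySem.List.pyRange 1 (PySem.List.len (x :: t')) 1).foldl
            (fun s i => if PySem.List.pyGetD (x :: (t' ++ [y])) i 0 > s.1 then (PySem.List.pyGetD (x :: (t' ++ [y])) i 0, i) else s)
            (PySem.List.pyGetD (x :: (t' ++ [y])) 0 0, (0 : Int)))
          = ((PySem.List.pyRange 1 (PySem.List.len (x :: t')) 1).foldl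
            (fun s i => if PySem.List.pyGetD (x :: t') i 0 > s.1 then (PySem.List.pyGetD (x :: t') i 0, i) else s)
            (PySem.List.pyGetD (x :: t') 0 0, (0 : Int))) := by
        rw [show PySem.List.pyGetD (x :: (t' ++ [y])) 0 0 = PySem.List.pyGetD (x :: t') 0 0 by
          simp [PySem.List.pyGetD_zero_cons]]
        apply PySem.List.foldl_congr_mem
        intro acc i hi
        have hmem := (PySem.List.mem_pyRange_one).1 hi
        have h1 : PySem.List.pyGetD (x :: (t' ++ [y])) i 0 = PySem.List.pyGetD (x :: t') i 0 := by
          have h0 : (0:Int) ≤ i := by omega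
          have hlt : i < ((x :: t').length : Int) := by
            have h2 := hmem.2; simpa [PySem.List.len] using h2
          have hlt2 : i < ((x :: (t' ++ [y])).length : Int) := by
            simp at hlt ⊢; omega
          rw [PySem.List.pyGetD_eq_getElem _ _ h0 hlt2,
            PySem.List.pyGetD_eq_getElem _ _ h0 hlt]
          have hlt' : i.toNat < (x :: t').length := by
            simp at hlt ⊢; omega
          show ((x :: t') ++ [y])[i.toNat]'(by have h3 := hlt'; simp at h3 ⊢; omega) = (x :: t')[i.toNat]'hlt'
          exact List.getElem_append_left hlt'
        rw [h1]
      rw [hcongr, ih]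
      have hM := PySem.List.le_foldl_max t' x
      set M := t'.foldl max x with hMdef
      have hMmem : M ∈ x :: t' := List.max?_mem rfl
      have hylast : PySem.List.pyGetD (x :: (t' ++ [y])) (PySem.List.len (x :: t')) 0 = y := by
        rw [show (x :: (t' ++ [y])) = (x :: t') ++ [y] by simp]
        have : PySem.List.len (x :: t') = ((x :: t').length : Int) := by simp
        rw [this]
        rw [PySem.List.pyGetD_eq_getElem _ _ (by positivity) (by simp)]
        simp
      simp only [List.foldl_cons, List.foldl_nil, hylast]
      by_cases hy : y > M
      · rw [if_pos hy]
        have hmax : (t' ++ [y]).foldl max x = y := by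
          rw [List.foldl_append, ← hMdef]
          show max M y = y
          exact max_eq_right (le_of_lt hy)
        have hynot : y ∉ x :: t' := by
          intro hmem'
          have hle' : y ≤ M := by
            rcases List.mem_cons.1 hmem' with h | h
            · exact h ▸ hM.1
            · exact hM.2 y h
          omega
        have hidx : PySem.List.index? (x :: (t' ++ [y])) y = some (x :: t').length := by
          rw [show (x :: (t' ++ [y])) = (x :: t') ++ [y] by simp]
          exact PySem.List.index?_append_singleton_self _ _ hynot
        rw [hmax, hidx]
        simp [PySem.List.len]
      · rw [if_neg hy]
        have hmax : (t' ++ [y]).foldl max x = M := by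
          rw [List.foldl_append, ← hMdef]
          show max M y = M
          exact max_eq_left (not_lt.mp hy)
        have hidx : PySem.List.index? (x :: (t' ++ [y])) M = PySem.List.index? (x :: t') M := by
          rw [show (x :: (t' ++ [y])) = (x :: t') ++ [y] by simp]
          exact PySem.List.index?_append_of_mem _ hMmem
        rw [hmax, hidx]

-- B's backward sweep: the head of suffMaxB (x :: t) is the maximum of x :: t.
lemma suffMaxB_head (x : Int) (t : List Int) :
    (suffMaxB (x :: t)).headD 0 = t.foldl max x := by
  induction t generalizing x with
  | nil => simp [suffMaxB]
  | cons y t' ih =>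
      have hacc : t'.foldl max (max x y) = max x (t'.foldl max y) := List.foldl_assoc
      simp only [suffMaxB, ih y, List.headD_cons, List.foldl_cons, hacc]
      by_cases h : t'.foldl max y > x
      · rw [if_pos h]; omega
      · rw [if_neg h]; omega

-- B's forward scan finds exactly the first index of the maximum.
lemma findEqIdxB_char (x : Int) (t : List Int) :
    findEqIdxB (x :: t) (suffMaxB (x :: t))
      = (PySem.List.index? (x :: t) (t.foldl max x)).getD 0 := by
  induction t generalizing x with
  | nil =>
      simp [suffMaxB, findEqIdxB]
  | cons y t' ih =>
      have hhead : (suffMaxB (y :: t')).headD 0 = t'.foldl max y := suffMaxB_head y t'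
      have hne : suffMaxB (y :: t') ≠ [] := by
        cases t' <;> simp [suffMaxB]
      obtain ⟨s0, st, hs⟩ : ∃ s0 st, suffMaxB (y :: t') = s0 :: st := by
        cases hsm : suffMaxB (y :: t') with
        | nil => exact absurd hsm hne
        | cons a b => exact ⟨a, b, rfl⟩
      have hs0 : s0 = t'.foldl max y := by rw [hs] at hhead; simpa using hhead
      have hM : (y :: t').foldl max x = max x (t'.foldl max y) := by
        have hacc : t'.foldl max (max x y) = max x (t'.foldl max y) := List.foldl_assoc
        simp only [List.foldl_cons, hacc]
      show findEqIdxB (x :: y :: t') (suffMaxB (x :: y :: t')) = _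
      rw [show suffMaxB (x :: y :: t') = (if (suffMaxB (y :: t')).headD 0 > x
            then (suffMaxB (y :: t')).headD 0 else x) :: suffMaxB (y :: t') from rfl]
      rw [hhead, hM]
      by_cases hx : t'.foldl max y > x
      · -- maximum comes from the tail; head differs
        rw [if_pos hx]
        have hxm : max x (t'.foldl max y) = t'.foldl max y := by omega
        rw [hxm]
        have hxne : x ≠ t'.foldl max y := by omega
        rw [PySem.List.index?_cons_of_ne _ hxne]
        have hmemt : t'.foldl max y ∈ y :: t' := List.max?_mem rfl
        obtain ⟨k, hk⟩ := Option.isSome_iff_exists.1 ((PySem.List.index?_isSome_iff _ _).2 hmemt)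
        rw [show findEqIdxB (x :: y :: t') (t'.foldl max y :: suffMaxB (y :: t'))
              = findEqIdxB (y :: t') (suffMaxB (y :: t')) + 1 by
            simp [findEqIdxB, hxne]]
        rw [ih y, hk]
        simp
      · -- x itself is (a) maximum; head matches at index 0
        rw [if_neg hx]
        have hxm : max x (t'.foldl max y) = x := by omega
        rw [hxm]
        rw [PySem.List.index?_cons_self]
        simp [findEqIdxB]

-- ===== VERDICT (by name: the statement is the Claim_ definition above) =====
theorem replace_max_with_zero_spec : Claim_equal_replace_max_with_zero := by
  intro arr _
  unfold Spec_replace_max_with_zero replace_max_with_zero replace_max_with_zero_alt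
  cases arr with
  | nil => simp
  | cons x t =>
      simp only [if_neg (List.cons_ne_nil x t), if_neg (by simp : ¬ (x :: t).length = 0)]
      rw [loopA_char x t, findEqIdxB_char x t]
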